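-- pv_equiv track=rewrite | github.com/vaishnavimore23/CodingQuestions | test2.py | longest_good_subarray
-- ===== SOURCE A (Python) =====
-- def count_set_bits(num):
--     count = 0
--     while num:
--         count += num & 1
--         num >>= 1
--     return count
--
-- def longest_good_subarray(mn, mx, n, arr):
--     max_length = 0
--     for i in range(n):
--         current_value = 0
--         for j in range(i, n):
--             current_value |= arr[j]
--             num_set_bits = count_set_bits(current_value)
--             if mn <= num_set_bits <= mx:
--                 max_length = max(max_length, j - i + 1)
--     return max_length
-- ===== SOURCE B (Python) =====
-- def _window_or(counts):
--     cur = 0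
--     for b in range(32):
--         if counts[b]:
--             cur |= 1 << b
--     return cur
--
--
-- def _popcount(x):
--     return bin(x).count("1")
--
--
-- def longest_good_subarray(mn, mx, n, arr):
--     # Sliding window: the popcount of the window OR only grows when the window
--     # grows, so a two-pointer scan with per-bit occurrence counts is exact.
--     counts = [0] * 32
--     l = 0
--     best = 0
--     for r in range(n):
--         for b in range(32):
--             if (arr[r] >> b) & 1:
--                 counts[b] += 1
--         while l <= r and _popcount(_window_or(counts)) > mx:
--             for b in range(32):
--                 if (arr[l] >> b) & 1:
--                     counts[b] -= 1
--             l += 1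
--         pc = _popcount(_window_or(counts))
--         if mn <= pc <= mx:
--             best = max(best, r - l + 1)
--     return best
-- ===== Notes on version B (the rewrite author's own statement) =====
-- stated objective: alternative
-- what changed: Replaced the all-pairs double loop (recomputing the popcount of every subarray OR) by a two-pointer sliding window that maintains per-bit occurrence counts of the current window, exploiting that the popcount of the window OR is monotone in window inclusion.
import Mathlib
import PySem

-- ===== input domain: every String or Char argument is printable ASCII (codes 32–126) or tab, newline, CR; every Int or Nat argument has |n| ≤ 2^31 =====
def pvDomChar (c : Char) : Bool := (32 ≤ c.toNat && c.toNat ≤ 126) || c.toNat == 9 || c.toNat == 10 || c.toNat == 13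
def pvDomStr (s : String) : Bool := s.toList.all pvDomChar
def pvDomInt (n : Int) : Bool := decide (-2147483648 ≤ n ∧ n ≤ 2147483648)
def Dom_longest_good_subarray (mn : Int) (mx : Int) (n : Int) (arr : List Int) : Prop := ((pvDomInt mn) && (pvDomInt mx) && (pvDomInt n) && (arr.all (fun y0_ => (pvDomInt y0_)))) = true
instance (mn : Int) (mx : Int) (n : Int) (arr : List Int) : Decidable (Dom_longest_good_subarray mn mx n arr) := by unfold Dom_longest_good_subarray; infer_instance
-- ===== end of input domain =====

-- B replaces A's all-pairs scan by a two-pointer sliding window with per-bit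
-- occurrence counts (correct because the popcount of the window OR is monotone
-- in window inclusion); a genuinely different algorithm, same return value.

-- ===== PORT A =====
-- count_set_bits: 'while num: count += num & 1; num >>= 1'.
-- Exact for num ≥ 0 (guaranteed under Pre_); Python diverges on negative num,
-- which Pre_ excludes (OR of the admitted nonnegative prefix is nonnegative).
def csbGo (m : Nat) : Int :=
  if h : m = 0 then 0 else ((m % 2 : Nat) : Int) + csbGo (m / 2)
termination_by m
decreasing_by exact Nat.div_lt_self (Nat.pos_of_ne_zero h) (by omega)

def count_set_bits (num : Int) : Int := csbGo num.toNat

-- the nested loops of A; state of the inner loop = (current_value, max_length)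
def longest_good_subarray (mn : Int) (mx : Int) (n : Int) (arr : List Int) : Int :=
  (List.range n.toNat).foldl (fun max_length i =>
    ((List.range' i (n.toNat - i)).foldl (fun (st : Int × Int) j =>
      let cv := Int.lor st.1 (arr.getD j 0)
      let nsb := count_set_bits cv
      (cv, if mn ≤ nsb ∧ nsb ≤ mx then max st.2 ((j : Int) - (i : Int) + 1) else st.2))
      (0, max_length)).2) 0

-- ===== PORT B =====
-- _window_or: OR together 1 << b for every bit b with a nonzero occurrence count
def window_or (counts : List Int) : Int :=
  (List.range 32).foldl
    (fun cur b => if counts.getD b 0 ≠ 0 then Int.lor cur ((1 <<< b : Nat) : Int) else cur) 0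

-- _popcount: bin(x).count("1") — number of set bits (callers pass x ≥ 0)
def pcGo (m : Nat) : Int :=
  if h : m = 0 then 0 else ((m % 2 : Nat) : Int) + pcGo (m / 2)
termination_by m
decreasing_by exact Nat.div_lt_self (Nat.pos_of_ne_zero h) (by omega)

def popcount (x : Int) : Int := pcGo x.toNat

-- 'for b in range(32): if (v >> b) & 1: counts[b] += 1'
def add_counts (v : Int) (counts : List Int) : List Int :=
  (List.range 32).foldl
    (fun c b => if Int.land (Int.shiftRight v b) 1 ≠ 0 then c.set b (c.getD b 0 + 1) else c) counts

-- 'for b in range(32): if (arr[l] >> b) & 1: counts[b] -= 1'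
def sub_counts (v : Int) (counts : List Int) : List Int :=
  (List.range 32).foldl
    (fun c b => if Int.land (Int.shiftRight v b) 1 ≠ 0 then c.set b (c.getD b 0 - 1) else c) counts

-- 'while l <= r and _popcount(_window_or(counts)) > mx: …; l += 1'
def shrinkLoop (arr : List Int) (mx : Int) (r : Nat) (l : Nat) (counts : List Int) :
    Nat × List Int :=
  if h : l ≤ r ∧ mx < popcount (window_or counts) then
    shrinkLoop arr mx r (l + 1) (sub_counts (arr.getD l 0) counts)
  else (l, counts)
termination_by r + 1 - l
decreasing_by omega

-- main loop of B; state = (l, counts, best)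
def longest_good_subarray_alt (mn : Int) (mx : Int) (n : Int) (arr : List Int) : Int :=
  ((List.range n.toNat).foldl (fun (st : Nat × List Int × Int) r =>
    let counts1 := add_counts (arr.getD r 0) st.2.1
    let p := shrinkLoop arr mx r st.1 counts1
    let pc := popcount (window_or p.2)
    (p.1, p.2, if mn ≤ pc ∧ pc ≤ mx then max st.2.2 ((r : Int) - (p.1 : Int) + 1) else st.2.2))
    (0, List.replicate 32 0, 0)).2.2

-- ===== PRECONDITION & SPEC =====
-- Pre_ excludes exactly the inputs where Python A does not return: n > len(arr)
-- raises IndexError, and a negative value among the first n elements makes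
-- count_set_bits loop forever (num >>= 1 never reaches 0 for num < 0).
def Pre_longest_good_subarray (mn : Int) (mx : Int) (n : Int) (arr : List Int) : Prop :=
  n ≤ (arr.length : Int) ∧ ∀ x ∈ arr.take n.toNat, 0 ≤ x

instance (mn : Int) (mx : Int) (n : Int) (arr : List Int) :
    Decidable (Pre_longest_good_subarray mn mx n arr) := by
  unfold Pre_longest_good_subarray; infer_instance

def pvWitness_longest_good_subarray : Int × Int × Int × List Int := (1, 2, 3, [1, 2, 4])

def Spec_longest_good_subarray (mn : Int) (mx : Int) (n : Int) (arr : List Int) (out : Int) : Prop :=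
  out = longest_good_subarray_alt mn mx n arr

instance (mn : Int) (mx : Int) (n : Int) (arr : List Int) (out : Int) :
    Decidable (Spec_longest_good_subarray mn mx n arr out) := by
  unfold Spec_longest_good_subarray; infer_instance

-- ===== CLAIM (what is proved, stated in full; the proofs are below) =====
def Claim_equal_longest_good_subarray : Prop := ∀ (mn : Int) (mx : Int) (n : Int) (arr : List Int), Dom_longest_good_subarray mn mx n arr → Pre_longest_good_subarray mn mx n arr → Spec_longest_good_subarray mn mx n arr (longest_good_subarray mn mx n arr)

-- ===== LEMMAS AND PROOFS =====

-- value of the k-th element as a natural number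
def wv (arr : List Int) (k : Nat) : Nat := (arr.getD k 0).toNat
-- OR of a list of naturals
def orList (xs : List Nat) : Nat := xs.foldl (· ||| ·) 0
-- OR of the window [l, r)
def orW (arr : List Int) (l r : Nat) : Nat := orList ((List.range' l (r - l)).map (wv arr))

-- a good pair (i, j): subarray arr[i..j] within the first N elements whose OR
-- has a popcount in [mn, mx]
def goodPair (mn mx : Int) (arr : List Int) (N i j : Nat) : Prop :=
  i ≤ j ∧ j < N ∧ mn ≤ csbGo (orW arr i (j + 1)) ∧ csbGo (orW arr i (j + 1)) ≤ mx

-- characterization of the answer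
def IsAns (mn mx : Int) (arr : List Int) (N : Nat) (M : Int) : Prop :=
  0 ≤ M ∧ (∀ i j, goodPair mn mx arr N i j → (j : Int) - (i : Int) + 1 ≤ M) ∧
    (M = 0 ∨ ∃ i j, goodPair mn mx arr N i j ∧ M = (j : Int) - (i : Int) + 1)

theorem IsAns_unique (mn mx : Int) (arr : List Int) (N : Nat) (M M' : Int)
    (h : IsAns mn mx arr N M) (h' : IsAns mn mx arr N M') : M = M' := by
  obtain ⟨h0, hub, hat⟩ := h
  obtain ⟨h0', hub', hat'⟩ := h'
  rcases hat with rfl | ⟨i, j, hp, rfl⟩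
  · rcases hat' with rfl | ⟨i, j, hp, rfl⟩
    · rfl
    · have := hub _ _ hp; have := hp.1; omega
  · rcases hat' with rfl | ⟨i', j', hp', rfl⟩
    · have := hub' _ _ hp; have := hp.1; omega
    · have := hub _ _ hp'; have := hub' _ _ hp; omega

theorem csbGo_nonneg (m : Nat) : 0 ≤ csbGo m := by
  induction m using Nat.strong_induction_on with
  | _ m ih =>
    rw [csbGo]
    split
    · omega
    · have := ih (m / 2) (Nat.div_lt_self (by omega) (by omega))
      positivity

theorem pcGo_eq_csbGo (m : Nat) : pcGo m = csbGo m := by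
  induction m using Nat.strong_induction_on with
  | _ m ih =>
    rw [pcGo, csbGo]
    split
    · rfl
    · rw [ih (m / 2) (Nat.div_lt_self (by omega) (by omega))]

theorem csbGo_eq_countP (k : Nat) : ∀ m : Nat, m < 2 ^ k →
    csbGo m = ((List.range k).countP (fun b => m.testBit b) : Int) := by
  induction k with
  | zero => intro m hm; interval_cases m; simp [csbGo]
  | succ k ih =>
    intro m hm
    rcases Nat.eq_zero_or_pos m with rfl | hpos
    · simp [csbGo, Nat.zero_testBit]
    · rw [csbGo]
      rw [dif_neg (by omega)]
      rw [ih (m / 2) (by omega)]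
      rw [List.range_succ_eq_map, List.countP_cons, List.countP_map]
      have : (fun b => m.testBit b) ∘ Nat.succ = fun b => (m / 2).testBit b := by
        funext b; simp [Function.comp, Nat.testBit_add_one]
      rw [this]
      rcases Nat.mod_two_eq_zero_or_one m with h2 | h2
      · simp [Nat.testBit_zero, h2]
      · simp [Nat.testBit_zero, h2]
        push_cast
        ring

theorem lor_lt_two_pow {x y n : Nat} (hx : x < 2 ^ n) (hy : y < 2 ^ n) : x ||| y < 2 ^ n := by
  exact Nat.bitwise_lt_two_pow hx hy

theorem csbGo_le_lor (a b : Nat) (ha : a < 2 ^ 32) (hb : b < 2 ^ 32) :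
    csbGo a ≤ csbGo (a ||| b) := by
  rw [csbGo_eq_countP 32 a ha, csbGo_eq_countP 32 _ (lor_lt_two_pow ha hb)]
  have := List.countP_mono_left (l := List.range 32) (p := fun c => a.testBit c)
    (q := fun c => (a ||| b).testBit c) (by intro x _ hx; simp [hx])
  exact_mod_cast this

theorem foldl_or_init (xs : List Nat) (a : Nat) : xs.foldl (· ||| ·) a = a ||| orList xs := by
  induction xs generalizing a with
  | nil => simp [orList]
  | cons x xs ih =>
    simp only [List.foldl_cons, orList] at *
    rw [ih (a ||| x), ih (0 ||| x)]
    simp [Nat.lor_assoc]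

theorem orList_append (xs ys : List Nat) : orList (xs ++ ys) = orList xs ||| orList ys := by
  simp only [orList, List.foldl_append]
  exact foldl_or_init ys _

theorem testBit_orList (xs : List Nat) (c : Nat) :
    (orList xs).testBit c = xs.any (fun x => x.testBit c) := by
  induction xs with
  | nil => simp [orList, Nat.zero_testBit]
  | cons x xs ih =>
    rw [show orList (x :: xs) = x ||| orList xs from ?_]
    · simp [ih]
    · simp only [orList, List.foldl_cons]
      rw [foldl_or_init, Nat.zero_or]
      rfl

theorem orList_lt (xs : List Nat) (h : ∀ x ∈ xs, x < 2 ^ 32) : orList xs < 2 ^ 32 := by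
  induction xs with
  | nil => exact Nat.two_pow_pos 32
  | cons x xs ih =>
    rw [show orList (x :: xs) = x ||| orList xs from ?_]
    · exact lor_lt_two_pow (h x (by simp)) (ih (fun y hy => h y (by simp [hy])))
    · simp only [orList, List.foldl_cons]
      rw [foldl_or_init, Nat.zero_or]
      rfl

theorem orW_snoc (arr : List Int) (l r : Nat) (h : l ≤ r) :
    orW arr l (r + 1) = orW arr l r ||| wv arr r := by
  unfold orW
  rw [show r + 1 - l = (r - l) + 1 by omega, List.range'_concat,
    show l + 1 * (r - l) = r by omega, List.map_append, orList_append]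
  simp [orList]

theorem orW_split (arr : List Int) (i i' r : Nat) (h1 : i ≤ i') (h2 : i' ≤ r) :
    orW arr i r = orW arr i i' ||| orW arr i' r := by
  unfold orW
  rw [show r - i = (i' - i) + (r - i') by omega, ← List.range'_append,
    show i + 1 * (i' - i) = i' by omega, List.map_append, orList_append]

theorem orW_lt (arr : List Int) (hw : ∀ k, wv arr k < 2 ^ 32) (l r : Nat) :
    orW arr l r < 2 ^ 32 := by
  apply orList_lt
  intro x hx
  simp only [List.mem_map] at hx
  obtain ⟨k, _, rfl⟩ := hx
  exact hw k

theorem csb_orW_mono (arr : List Int) (hw : ∀ k, wv arr k < 2 ^ 32) (i i' r : Nat)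
    (h1 : i ≤ i') (h2 : i' ≤ r) : csbGo (orW arr i' r) ≤ csbGo (orW arr i r) := by
  rw [orW_split arr i i' r h1 h2]
  rw [Nat.lor_comm]
  exact csbGo_le_lor _ _ (orW_lt arr hw _ _) (orW_lt arr hw _ _)

theorem csb_orW_mono_right (arr : List Int) (hw : ∀ k, wv arr k < 2 ^ 32) (i r r' : Nat)
    (h1 : i ≤ r) (h2 : r ≤ r') : csbGo (orW arr i r) ≤ csbGo (orW arr i r') := by
  rcases Nat.le_total r i with h | h
  · have h0 : orW arr i r = 0 := by unfold orW; rw [show r - i = 0 by omega]; rfl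
    rw [h0, show csbGo 0 = 0 from by rw [csbGo]; simp]
    exact csbGo_nonneg _
  · rw [orW_split arr i r r' h h2]
    exact csbGo_le_lor _ _ (orW_lt arr hw _ _) (orW_lt arr hw _ _)


-- ---- bridges between the Int-valued ports and the Nat-level spec ----

theorem count_set_bits_natCast (m : Nat) : count_set_bits (m : Int) = csbGo m := by
  simp [count_set_bits]

theorem popcount_eq (x : Int) : popcount x = csbGo x.toNat := pcGo_eq_csbGo _

theorem int_lor_natCast (a b : Nat) : Int.lor (a : Int) (b : Int) = ((a ||| b : Nat) : Int) := rfl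

theorem bitcond_iff (v : Int) (hv : 0 ≤ v) (b : Nat) :
    (Int.land (Int.shiftRight v b) 1 ≠ 0) ↔ v.toNat.testBit b = true := by
  obtain ⟨m, rfl⟩ : ∃ m : Nat, v = (m : Int) := ⟨v.toNat, (Int.toNat_of_nonneg hv).symm⟩
  rw [show Int.land (Int.shiftRight (m : Int) b) 1 = (((m >>> b) &&& 1 : Nat) : Int) from rfl]
  rw [Nat.testBit]
  simp only [Int.toNat_natCast]
  rw [Nat.land_comm 1 (m >>> b)]
  simp only [Nat.and_one_is_mod, ne_eq, bne_iff_ne]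
  omega

-- ---- the value computed by _window_or, at the Nat level ----

def bitsOfN (counts : List Int) (m : Nat) : Nat :=
  (List.range m).foldl (fun cur b => if counts.getD b 0 ≠ 0 then cur ||| (1 <<< b) else cur) 0

theorem window_or_cast (counts : List Int) : window_or counts = ((bitsOfN counts 32 : Nat) : Int) := by
  unfold window_or bitsOfN
  generalize List.range 32 = bs
  suffices h : ∀ (cur : Nat),
      (bs.foldl (fun cur b => if counts.getD b 0 ≠ 0 then Int.lor cur ((1 <<< b : Nat) : Int) else cur) (cur : Int)) =
      ((bs.foldl (fun cur b => if counts.getD b 0 ≠ 0 then cur ||| (1 <<< b) else cur) cur : Nat) : Int) by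
    exact_mod_cast h 0
  induction bs with
  | nil => intro cur; rfl
  | cons b bs ih =>
    intro cur
    simp only [List.foldl_cons]
    split
    · rw [int_lor_natCast, ih]
    · rw [ih]

theorem bitsOfN_succ (counts : List Int) (m : Nat) :
    bitsOfN counts (m + 1) =
      if counts.getD m 0 ≠ 0 then bitsOfN counts m ||| (1 <<< m) else bitsOfN counts m := by
  unfold bitsOfN
  rw [List.range_succ, List.foldl_append]
  rfl

theorem bitsOfN_lt (counts : List Int) (m : Nat) : bitsOfN counts m < 2 ^ m := by
  induction m with
  | zero => simp [bitsOfN]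
  | succ m ih =>
    rw [bitsOfN_succ]
    have h1 : bitsOfN counts m < 2 ^ (m + 1) :=
      lt_of_lt_of_le ih (Nat.pow_le_pow_right (by omega) (by omega))
    have h2 : (1 <<< m : Nat) < 2 ^ (m + 1) := by
      rw [Nat.shiftLeft_eq, one_mul]
      exact Nat.pow_lt_pow_right (by omega) (by omega)
    split
    · exact lor_lt_two_pow h1 h2
    · exact h1

theorem testBit_bitsOfN (counts : List Int) (m c : Nat) :
    (bitsOfN counts m).testBit c = true ↔ c < m ∧ counts.getD c 0 ≠ 0 := by
  induction m with
  | zero => simp [bitsOfN, Nat.zero_testBit]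
  | succ m ih =>
    rw [bitsOfN_succ]
    by_cases hcm : counts.getD m 0 ≠ 0
    · rw [if_pos hcm, Nat.testBit_lor,
        show (1 <<< m : Nat) = 2 ^ m by rw [Nat.shiftLeft_eq, one_mul], Nat.testBit_two_pow]
      simp only [Bool.or_eq_true, ih, decide_eq_true_eq]
      constructor
      · rintro (⟨h1, h2⟩ | rfl)
        · exact ⟨by omega, h2⟩
        · exact ⟨by omega, hcm⟩
      · rintro ⟨h1, h2⟩
        rcases Nat.lt_or_ge c m with h | h
        · exact Or.inl ⟨h, h2⟩
        · exact Or.inr (by omega)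
    · rw [if_neg hcm, ih]
      constructor
      · rintro ⟨h1, h2⟩; exact ⟨by omega, h2⟩
      · rintro ⟨h1, h2⟩
        refine ⟨?_, h2⟩
        by_cases h : c = m
        · subst h; exact absurd h2 hcm
        · omega

-- ---- per-bit occurrence counts of the window [l, r) ----

def CountsOk (arr : List Int) (l r : Nat) (counts : List Int) : Prop :=
  counts.length = 32 ∧ ∀ b, b < 32 →
    counts.getD b 0 = (((List.range' l (r - l)).countP (fun k => (wv arr k).testBit b) : Nat) : Int)

theorem foldSet_spec (p : Nat → Prop) [DecidablePred p] (d : Int) (m : Nat) (hm : m ≤ 32) :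
    ∀ counts : List Int, counts.length = 32 →
      (((List.range m).foldl (fun c b => if p b then c.set b (c.getD b 0 + d) else c) counts).length = 32 ∧
       ∀ j, ((List.range m).foldl (fun c b => if p b then c.set b (c.getD b 0 + d) else c) counts).getD j 0 =
         counts.getD j 0 + if j < m ∧ p j then d else 0) := by
  induction m with
  | zero => intro counts h; simp [h]
  | succ m ih =>
    intro counts h
    rw [List.range_succ, List.foldl_append]
    obtain ⟨ihlen, ihget⟩ := ih (by omega) counts h
    simp only [List.foldl_cons, List.foldl_nil]
    by_cases hp : p m
    · rw [if_pos hp]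
      refine ⟨by rw [List.length_set]; exact ihlen, fun j => ?_⟩
      rcases eq_or_ne j m with rfl | hne
      · rw [List.getD_eq_getElem?_getD, List.getElem?_set_self (by rw [ihlen]; omega)]
        simp only [Option.getD_some]
        rw [ihget j, if_neg (by omega), if_pos ⟨by omega, hp⟩]
        ring
      · rw [List.getD_eq_getElem?_getD, List.getElem?_set_ne (Ne.symm hne),
          ← List.getD_eq_getElem?_getD, ihget j]
        by_cases hj : j < m ∧ p j
        · rw [if_pos hj, if_pos ⟨by omega, hj.2⟩]
        · rw [if_neg hj, if_neg (fun hh => hj ⟨by omega, hh.2⟩)]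
    · rw [if_neg hp]
      refine ⟨ihlen, fun j => ?_⟩
      rw [ihget j]
      by_cases hj : j < m ∧ p j
      · rw [if_pos hj, if_pos ⟨by omega, hj.2⟩]
      · rw [if_neg hj, if_neg ?_]
        rintro ⟨h1, h2⟩
        rcases eq_or_ne j m with rfl | hne
        · exact hp h2
        · exact hj ⟨by omega, h2⟩

theorem add_counts_spec (v : Int) (hv : 0 ≤ v) (counts : List Int) (h : counts.length = 32) :
    (add_counts v counts).length = 32 ∧ ∀ j,
      (add_counts v counts).getD j 0 =
        counts.getD j 0 + if j < 32 ∧ v.toNat.testBit j then 1 else 0 := by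
  unfold add_counts
  obtain ⟨h1, h2⟩ := foldSet_spec (fun b => Int.land (Int.shiftRight v b) 1 ≠ 0) 1 32 le_rfl counts h
  refine ⟨h1, fun j => ?_⟩
  rw [h2 j]
  congr 1
  by_cases hj : j < 32 ∧ v.toNat.testBit j
  · rw [if_pos ⟨hj.1, (bitcond_iff v hv j).mpr hj.2⟩, if_pos hj]
  · rw [if_neg (by rintro ⟨ha, hb⟩; exact hj ⟨ha, (bitcond_iff v hv j).mp hb⟩), if_neg hj]

theorem sub_counts_spec (v : Int) (hv : 0 ≤ v) (counts : List Int) (h : counts.length = 32) :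
    (sub_counts v counts).length = 32 ∧ ∀ j,
      (sub_counts v counts).getD j 0 =
        counts.getD j 0 - if j < 32 ∧ v.toNat.testBit j then 1 else 0 := by
  have he : sub_counts v counts = (List.range 32).foldl
      (fun c b => if Int.land (Int.shiftRight v b) 1 ≠ 0 then c.set b (c.getD b 0 + (-1)) else c) counts := rfl
  rw [he]
  obtain ⟨h1, h2⟩ := foldSet_spec (fun b => Int.land (Int.shiftRight v b) 1 ≠ 0) (-1) 32 le_rfl counts h
  refine ⟨h1, fun j => ?_⟩
  rw [h2 j]
  by_cases hj : j < 32 ∧ v.toNat.testBit j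
  · rw [if_pos ⟨hj.1, (bitcond_iff v hv j).mpr hj.2⟩, if_pos hj]; ring
  · rw [if_neg (by rintro ⟨ha, hb⟩; exact hj ⟨ha, (bitcond_iff v hv j).mp hb⟩), if_neg hj]; ring

theorem bitsOfN_eq_orW (arr : List Int) (hw : ∀ k, wv arr k < 2 ^ 32) (l r : Nat)
    (counts : List Int) (hc : CountsOk arr l r counts) : bitsOfN counts 32 = orW arr l r := by
  apply Nat.eq_of_testBit_eq
  intro c
  rcases Nat.lt_or_ge c 32 with hc32 | hc32
  · have horw : (orW arr l r).testBit c = ((List.range' l (r - l)).any fun k => (wv arr k).testBit c) := by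
      rw [orW, testBit_orList, List.any_map]
      rfl
    have hany : ((List.range' l (r - l)).any fun k => (wv arr k).testBit c) = true ↔
        counts.getD c 0 ≠ 0 := by
      rw [List.any_eq_true, hc.2 c hc32]
      constructor
      · rintro ⟨k, hk, hkb⟩
        have hpos : 0 < (List.range' l (r - l)).countP (fun k => (wv arr k).testBit c) :=
          List.countP_pos_iff.mpr ⟨k, hk, hkb⟩
        simp only [ne_eq, Nat.cast_eq_zero]
        omega
      · intro hne
        simp only [ne_eq, Nat.cast_eq_zero] at hne
        exact List.countP_pos_iff.mp (by omega)
    rw [horw]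
    rcases Bool.eq_false_or_eq_true ((bitsOfN counts 32).testBit c) with hb | hb
    · rw [hb, eq_comm, hany]
      exact ((testBit_bitsOfN counts 32 c).mp hb).2
    · rw [hb, eq_comm, ← Bool.not_eq_true, hany]
      intro hne
      rw [Bool.eq_false_iff] at hb
      exact hb ((testBit_bitsOfN counts 32 c).mpr ⟨hc32, hne⟩)
  · have h1 : (bitsOfN counts 32).testBit c = false :=
      Nat.testBit_lt_two_pow (lt_of_lt_of_le (bitsOfN_lt counts 32)
        (Nat.pow_le_pow_right (by omega) hc32))
    have h2 : (orW arr l r).testBit c = false :=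
      Nat.testBit_lt_two_pow (lt_of_lt_of_le (orW_lt arr hw l r)
        (Nat.pow_le_pow_right (by omega) hc32))
    rw [h1, h2]

theorem pc_window (arr : List Int) (hw : ∀ k, wv arr k < 2 ^ 32) (l r : Nat)
    (counts : List Int) (hc : CountsOk arr l r counts) :
    popcount (window_or counts) = csbGo (orW arr l r) := by
  rw [window_or_cast, popcount_eq, Int.toNat_natCast, bitsOfN_eq_orW arr hw l r counts hc]


-- ---- generic foldl facts ----

theorem foldl_ge_init (l : List Nat) (f : Int → Nat → Int) (hge : ∀ x a, x ≤ f x a) :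
    ∀ x, x ≤ l.foldl f x := by
  induction l with
  | nil => intro x; exact le_rfl
  | cons b l ih => intro x; exact le_trans (hge x b) (ih (f x b))

theorem foldl_ge_elem (l : List Nat) (f : Int → Nat → Int) (hge : ∀ x a, x ≤ f x a)
    (a : Nat) (ha : a ∈ l) (c : Int) (hc : ∀ x, c ≤ f x a) : ∀ x, c ≤ l.foldl f x := by
  induction l with
  | nil => cases ha
  | cons b l ih =>
    intro x
    rcases List.mem_cons.mp ha with rfl | ha'
    · exact le_trans (hc x) (foldl_ge_init l f hge (f x a))
    · exact ih ha' (f x b)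

theorem foldl_preserve (P : Int → Prop) (l : List Nat) (f : Int → Nat → Int)
    (hstep : ∀ x a, a ∈ l → P x → P (f x a)) : ∀ x, P x → P (l.foldl f x) := by
  induction l with
  | nil => exact fun x hx => hx
  | cons b l ih =>
    intro x hx
    exact ih (fun y a ha hy => hstep y a (List.mem_cons_of_mem b ha) hy)
      (f x b) (hstep x b List.mem_cons_self hx)

theorem foldl_congr' {α β : Type} (l : List α) (f g : β → α → β) (x : β)
    (h : ∀ y a, a ∈ l → f y a = g y a) : l.foldl f x = l.foldl g x := by
  induction l generalizing x with
  | nil => rfl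
  | cons b l ih =>
    rw [List.foldl_cons, List.foldl_cons, h x b (List.mem_cons_self)]
    exact ih _ (fun y a ha => h y a (List.mem_cons_of_mem b ha))

-- ---- characterization of port A ----

-- the contribution of index j in A's inner loop, expressed through orW
def innerF (mn mx : Int) (arr : List Int) (i : Nat) (ml : Int) (j : Nat) : Int :=
  if mn ≤ csbGo (orW arr i (j + 1)) ∧ csbGo (orW arr i (j + 1)) ≤ mx
  then max ml ((j : Int) - (i : Int) + 1) else ml

theorem A_inner (mn mx : Int) (arr : List Int) (i : Nat) :
    ∀ (cnt j0 : Nat) (ml : Int), i ≤ j0 → (∀ k, j0 ≤ k → k < j0 + cnt → 0 ≤ arr.getD k 0) →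
      ((List.range' j0 cnt).foldl (fun (st : Int × Int) j =>
        let cv := Int.lor st.1 (arr.getD j 0)
        let nsb := count_set_bits cv
        (cv, if mn ≤ nsb ∧ nsb ≤ mx then max st.2 ((j : Int) - (i : Int) + 1) else st.2))
        (((orW arr i j0 : Nat) : Int), ml)).2 =
      (List.range' j0 cnt).foldl (innerF mn mx arr i) ml := by
  intro cnt
  induction cnt with
  | zero => intro j0 ml _ _; rfl
  | succ cnt ih =>
    intro j0 ml hij hnn
    rw [List.range'_succ, List.foldl_cons, List.foldl_cons]
    dsimp only
    rw [show arr.getD j0 0 = ((wv arr j0 : Nat) : Int) from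
      (Int.toNat_of_nonneg (hnn j0 le_rfl (by omega))).symm]
    rw [int_lor_natCast, ← orW_snoc arr i j0 hij, count_set_bits_natCast]
    rw [ih (j0 + 1) _ (by omega) (fun k hk1 hk2 => hnn k (by omega) (by omega))]
    unfold innerF
    rfl

theorem A_char (mn mx n : Int) (arr : List Int)
    (hnn : ∀ k, k < n.toNat → 0 ≤ arr.getD k 0) :
    longest_good_subarray mn mx n arr =
      (List.range n.toNat).foldl
        (fun ml i => (List.range' i (n.toNat - i)).foldl (innerF mn mx arr i) ml) 0 := by
  unfold longest_good_subarray
  apply foldl_congr'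
  intro ml i hi
  have hiN : i < n.toNat := List.mem_range.mp hi
  have h0 : ((0 : Int), ml) = (((orW arr i i : Nat) : Int), ml) := by
    unfold orW
    rw [Nat.sub_self]
    rfl
  rw [h0, A_inner mn mx arr i (n.toNat - i) i ml le_rfl
    (fun k hk1 hk2 => hnn k (by omega))]

theorem A_isAns (mn mx n : Int) (arr : List Int)
    (hnn : ∀ k, k < n.toNat → 0 ≤ arr.getD k 0) :
    IsAns mn mx arr n.toNat (longest_good_subarray mn mx n arr) := by
  rw [A_char mn mx n arr hnn]
  have hgeInner : ∀ (i : Nat) (x : Int) (a : Nat), x ≤ innerF mn mx arr i x a := by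
    intro i x a
    unfold innerF
    split
    · exact le_max_left _ _
    · exact le_rfl
  have hgeOuter : ∀ (x : Int) (i : Nat),
      x ≤ (List.range' i (n.toNat - i)).foldl (innerF mn mx arr i) x :=
    fun x i => foldl_ge_init _ _ (hgeInner i) x
  refine ⟨?_, ?_, ?_⟩
  · exact le_trans le_rfl (foldl_ge_init _ _ (fun x a => hgeOuter x a) 0)
  · intro i j hp
    obtain ⟨hij, hjN, hmn, hmx⟩ := hp
    refine foldl_ge_elem _ _ (fun x a => hgeOuter x a) i (List.mem_range.mpr (by omega))
      ((j : Int) - (i : Int) + 1) ?_ 0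
    intro x
    refine foldl_ge_elem _ _ (hgeInner i) j ?_ _ ?_ x
    · rw [List.mem_range'_1]
      omega
    · intro y
      unfold innerF
      rw [if_pos ⟨hmn, hmx⟩]
      exact le_max_right _ _
  · set P : Int → Prop := fun x => 0 ≤ x ∧ (x = 0 ∨ ∃ i j, goodPair mn mx arr n.toNat i j ∧
      x = (j : Int) - (i : Int) + 1) with hP
    have base : P 0 := ⟨le_rfl, Or.inl rfl⟩
    have main : P ((List.range n.toNat).foldl
        (fun ml i => (List.range' i (n.toNat - i)).foldl (innerF mn mx arr i) ml) 0) := by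
      refine foldl_preserve P _ _ ?_ 0 base
      intro x i hi hx
      refine foldl_preserve P _ _ ?_ x hx
      intro y j hj hy
      unfold innerF
      split
      · rename_i hgood
        have hmem := List.mem_range'_1.mp hj
        have hpair : goodPair mn mx arr n.toNat i j := ⟨by omega, by omega, hgood.1, hgood.2⟩
        rcases le_total y ((j : Int) - (i : Int) + 1) with h | h
        · rw [max_eq_right h]
          exact ⟨by omega, Or.inr ⟨i, j, hpair, rfl⟩⟩
        · rw [max_eq_left h]
          exact hy
      · exact hy
    exact main.2

-- ---- characterization of port B ----

-- loop invariant of B after processing the first r elements,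
-- for state (l, counts, best)
def BInv (mn mx : Int) (arr : List Int) (N r : Nat) (st : Nat × List Int × Int) : Prop :=
  st.1 ≤ r ∧ CountsOk arr st.1 r st.2.1 ∧
  (∀ i, i < st.1 → mx < csbGo (orW arr i r)) ∧
  0 ≤ st.2.2 ∧
  (∀ i j, goodPair mn mx arr N i j → j < r → (j : Int) - (i : Int) + 1 ≤ st.2.2) ∧
  (st.2.2 = 0 ∨ ∃ i j, goodPair mn mx arr N i j ∧ st.2.2 = (j : Int) - (i : Int) + 1)

theorem shrink_spec (arr : List Int) (hw : ∀ k, wv arr k < 2 ^ 32) (mx : Int) (r : Nat)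
    (hnn : ∀ k, k < r + 1 → 0 ≤ arr.getD k 0) :
    ∀ (fuel l : Nat) (counts : List Int), r + 1 - l ≤ fuel → l ≤ r + 1 →
      CountsOk arr l (r + 1) counts →
      (∀ i, i < l → mx < csbGo (orW arr i (r + 1))) →
      (shrinkLoop arr mx r l counts).1 ≤ r + 1 ∧
      CountsOk arr (shrinkLoop arr mx r l counts).1 (r + 1) (shrinkLoop arr mx r l counts).2 ∧
      (∀ i, i < (shrinkLoop arr mx r l counts).1 → mx < csbGo (orW arr i (r + 1))) ∧
      (csbGo (orW arr (shrinkLoop arr mx r l counts).1 (r + 1)) ≤ mx ∨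
        (shrinkLoop arr mx r l counts).1 = r + 1) := by
  intro fuel
  induction fuel with
  | zero =>
    intro l counts hfuel hl hc hmin
    have hl' : l = r + 1 := by omega
    rw [shrinkLoop, dif_neg (by omega)]
    exact ⟨hl, hc, hmin, Or.inr hl'⟩
  | succ fuel ih =>
    intro l counts hfuel hl hc hmin
    rw [shrinkLoop]
    by_cases h : l ≤ r ∧ mx < popcount (window_or counts)
    · rw [dif_pos h]
      have hpc : popcount (window_or counts) = csbGo (orW arr l (r + 1)) :=
        pc_window arr hw l (r + 1) counts hc
      have hv : 0 ≤ arr.getD l 0 := hnn l (by omega)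
      obtain ⟨hlen', hget'⟩ := sub_counts_spec (arr.getD l 0) hv counts hc.1
      have hc' : CountsOk arr (l + 1) (r + 1) (sub_counts (arr.getD l 0) counts) := by
        refine ⟨hlen', fun b hb => ?_⟩
        rw [hget' b, hc.2 b hb]
        rw [show r + 1 - l = (r - l) + 1 by omega, List.range'_succ, List.countP_cons]
        rw [show r + 1 - (l + 1) = r - l by omega]
        have hbit : (arr.getD l 0).toNat.testBit b = (wv arr l).testBit b := rfl
        by_cases hwb : (wv arr l).testBit b = true
        · rw [if_pos hwb, if_pos ⟨hb, by rw [hbit]; exact hwb⟩]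
          push_cast
          ring
        · rw [if_neg hwb,
            if_neg (fun hx : _ ∧ _ => hwb (by rw [← hbit]; exact hx.2))]
          push_cast
          ring
      have hmin' : ∀ i, i < l + 1 → mx < csbGo (orW arr i (r + 1)) := by
        intro i hi
        rcases Nat.lt_or_ge i l with h' | h'
        · exact hmin i h'
        · have : i = l := by omega
          subst this
          rw [← hpc]
          exact h.2
      exact ih (l + 1) _ (by omega) (by omega) hc' hmin'
    · rw [dif_neg h]
      refine ⟨hl, hc, hmin, ?_⟩
      rcases Nat.lt_or_ge r l with h' | h'
      · exact Or.inr (by omega)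
      · left
        rw [← pc_window arr hw l (r + 1) counts hc]
        omega
  
theorem B_step (mn mx : Int) (arr : List Int) (N : Nat) (hw : ∀ k, wv arr k < 2 ^ 32)
    (hnn : ∀ k, k < N → 0 ≤ arr.getD k 0) (r : Nat) (hr : r < N)
    (st : Nat × List Int × Int) (hInv : BInv mn mx arr N r st) :
    BInv mn mx arr N (r + 1)
      (let counts1 := add_counts (arr.getD r 0) st.2.1
       let p := shrinkLoop arr mx r st.1 counts1
       let pc := popcount (window_or p.2)
       (p.1, p.2, if mn ≤ pc ∧ pc ≤ mx then max st.2.2 ((r : Int) - (p.1 : Int) + 1) else st.2.2)) := by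
  obtain ⟨l, counts, best⟩ := st
  obtain ⟨hl, hc, hmin, hb0, hbub, hbat⟩ := hInv
  simp only at hl hc hmin hb0 hbub hbat ⊢
  have hvr : 0 ≤ arr.getD r 0 := hnn r hr
  -- counts after add_counts describe the window [l, r+1)
  obtain ⟨hlen1, hget1⟩ := add_counts_spec (arr.getD r 0) hvr counts hc.1
  have hc1 : CountsOk arr l (r + 1) (add_counts (arr.getD r 0) counts) := by
    refine ⟨hlen1, fun b hb => ?_⟩
    rw [hget1 b, hc.2 b hb]
    rw [show r + 1 - l = (r - l) + 1 by omega, List.range'_concat,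
      show l + 1 * (r - l) = r by omega, List.countP_append,
      List.countP_cons, List.countP_nil]
    have hbit : (arr.getD r 0).toNat.testBit b = (wv arr r).testBit b := rfl
    by_cases hwb : (wv arr r).testBit b = true
    · rw [if_pos hwb, if_pos ⟨hb, by rw [hbit]; exact hwb⟩]
      push_cast
      ring
    · rw [if_neg hwb, if_neg (fun hx : _ ∧ _ => hwb (by rw [← hbit]; exact hx.2))]
      push_cast
      ring
  have hmin1 : ∀ i, i < l → mx < csbGo (orW arr i (r + 1)) := by
    intro i hi
    exact lt_of_lt_of_le (hmin i hi) (csb_orW_mono_right arr hw i r (r + 1) (by omega) (by omega))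
  obtain ⟨hl2, hc2, hmin2, hok2⟩ := shrink_spec arr hw mx r (fun k hk => hnn k (by omega))
    (r + 1 - l) l (add_counts (arr.getD r 0) counts) le_rfl (by omega) hc1 hmin1
  set l2 := (shrinkLoop arr mx r l (add_counts (arr.getD r 0) counts)).1 with hl2def
  set counts2 := (shrinkLoop arr mx r l (add_counts (arr.getD r 0) counts)).2 with hc2def
  have hpc : popcount (window_or counts2) = csbGo (orW arr l2 (r + 1)) :=
    pc_window arr hw l2 (r + 1) counts2 hc2
  -- any good pair ending at r starts at or after l2
  have hstart : ∀ i, i ≤ r → csbGo (orW arr i (r + 1)) ≤ mx → l2 ≤ i := by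
    intro i hir hgood
    by_contra hcon
    exact absurd hgood (not_le.mpr (hmin2 i (by omega)))
  refine ⟨hl2, hc2, hmin2, ?_, ?_, ?_⟩
  · dsimp only
    split
    · exact le_trans hb0 (le_max_left _ _)
    · exact hb0
  · intro i j hp hjr
    dsimp only
    rcases Nat.lt_or_ge j r with hjr' | hjr'
    · have := hbub i j hp hjr'
      split
      · exact le_trans this (le_max_left _ _)
      · exact this
    · have hjeq : r = j := by omega
      subst hjeq
      obtain ⟨hij, hjN, hmn', hmx'⟩ := hp
      have hil2 : l2 ≤ i := hstart i hij hmx'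
      have hple : csbGo (orW arr l2 (r + 1)) ≤ mx := by
        rcases hok2 with h | h
        · exact h
        · omega
      have hpge : mn ≤ csbGo (orW arr l2 (r + 1)) :=
        le_trans hmn' (csb_orW_mono arr hw l2 i (r + 1) hil2 (by omega))
      rw [if_pos (by rw [hpc]; exact ⟨hpge, hple⟩)]
      have : (r : Int) - (i : Int) + 1 ≤ (r : Int) - (l2 : Int) + 1 := by
        have := hil2
        omega
      exact le_trans this (le_max_right _ _)
  · dsimp only
    split
    · rename_i hfired
      rw [hpc] at hfired
      rcases Nat.lt_or_ge r l2 with hcase | hcase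
      · -- empty window: the contribution r - l2 + 1 is ≤ 0, so the max keeps best
        have hle0 : (r : Int) - (l2 : Int) + 1 ≤ best := by
          have : r + 1 ≤ l2 := hcase
          omega
        rw [max_eq_left hle0]
        exact hbat
      · have hpair : goodPair mn mx arr N l2 r := ⟨hcase, hr, hfired.1, hfired.2⟩
        rcases le_total best ((r : Int) - (l2 : Int) + 1) with h | h
        · rw [max_eq_right h]
          exact Or.inr ⟨l2, r, hpair, rfl⟩
        · rw [max_eq_left h]
          exact hbat
    · exact hbat

theorem B_loop (mn mx : Int) (arr : List Int) (N : Nat) (hw : ∀ k, wv arr k < 2 ^ 32)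
    (hnn : ∀ k, k < N → 0 ≤ arr.getD k 0) :
    ∀ (cnt r0 : Nat) (st : Nat × List Int × Int), BInv mn mx arr N r0 st → r0 + cnt ≤ N →
      BInv mn mx arr N (r0 + cnt)
        ((List.range' r0 cnt).foldl (fun (st : Nat × List Int × Int) r =>
          let counts1 := add_counts (arr.getD r 0) st.2.1
          let p := shrinkLoop arr mx r st.1 counts1
          let pc := popcount (window_or p.2)
          (p.1, p.2, if mn ≤ pc ∧ pc ≤ mx then max st.2.2 ((r : Int) - (p.1 : Int) + 1) else st.2.2)) st) := by
  intro cnt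
  induction cnt with
  | zero => intro r0 st h _; exact h
  | succ cnt ih =>
    intro r0 st h hle
    rw [List.range'_succ, List.foldl_cons]
    have hstep := B_step mn mx arr N hw hnn r0 (by omega) st h
    have := ih (r0 + 1) _ hstep (by omega)
    rw [show r0 + (cnt + 1) = r0 + 1 + cnt by omega]
    exact this

theorem B_isAns (mn mx n : Int) (arr : List Int) (hw : ∀ k, wv arr k < 2 ^ 32)
    (hnn : ∀ k, k < n.toNat → 0 ≤ arr.getD k 0) :
    IsAns mn mx arr n.toNat (longest_good_subarray_alt mn mx n arr) := by
  have hrep : ∀ b : Nat, (List.replicate 32 (0 : Int)).getD b 0 = 0 := by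
    intro b
    rw [List.getD_eq_getElem?_getD, List.getElem?_replicate]
    split <;> rfl
  have hInit : BInv mn mx arr n.toNat 0 (0, List.replicate 32 0, 0) := by
    refine ⟨le_rfl, ⟨by simp, fun b hb => ?_⟩, fun i hi => by omega, le_rfl,
      fun i j hp hj => by omega, Or.inl rfl⟩
    rw [hrep b, Nat.sub_self]
    rfl
  have h := B_loop mn mx arr n.toNat hw hnn n.toNat 0 (0, List.replicate 32 0, 0) hInit (by omega)
  rw [Nat.zero_add] at h
  obtain ⟨-, -, -, hb0, hbub, hbat⟩ := h
  unfold longest_good_subarray_alt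
  rw [List.range_eq_range']
  exact ⟨hb0, fun i j hp => hbub i j hp hp.2.1, hbat⟩

-- ---- facts extracted from Dom_ and Pre_ ----

theorem dom_wv (mn mx n : Int) (arr : List Int) (hdom : Dom_longest_good_subarray mn mx n arr) :
    ∀ k, wv arr k < 2 ^ 32 := by
  intro k
  unfold Dom_longest_good_subarray at hdom
  simp only [Bool.and_eq_true, List.all_eq_true] at hdom
  unfold wv
  rcases Nat.lt_or_ge k arr.length with hk | hk
  · have hmem : arr.getD k 0 ∈ arr := by
      rw [List.getD_eq_getElem?_getD, List.getElem?_eq_getElem hk]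
      exact List.getElem_mem hk
    have := hdom.2 _ hmem
    unfold pvDomInt at this
    simp only [decide_eq_true_eq] at this
    have hle : (arr.getD k 0).toNat ≤ 2147483648 := by omega
    omega
  · rw [List.getD_eq_getElem?_getD, List.getElem?_eq_none (by omega)]
    simp

theorem pre_nonneg (mn mx n : Int) (arr : List Int)
    (hpre : Pre_longest_good_subarray mn mx n arr) :
    ∀ k, k < n.toNat → 0 ≤ arr.getD k 0 := by
  intro k hk
  obtain ⟨hlen, hnn⟩ := hpre
  have hkl : k < arr.length := by omega
  rw [List.getD_eq_getElem?_getD, List.getElem?_eq_getElem hkl]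
  simp only [Option.getD_some]
  refine hnn arr[k] ?_
  have hkt : k < (arr.take n.toNat).length := by
    rw [List.length_take]
    omega
  have heq : (arr.take n.toNat)[k] = arr[k] := List.getElem_take
  rw [← heq]
  exact List.getElem_mem hkt

-- ===== VERDICT (by name: the statement is the Claim_ definition above) =====
theorem longest_good_subarray_spec : Claim_equal_longest_good_subarray := by
  intro mn mx n arr hdom hpre
  unfold Spec_longest_good_subarray
  exact IsAns_unique mn mx arr n.toNat _ _
    (A_isAns mn mx n arr (pre_nonneg mn mx n arr hpre))
    (B_isAns mn mx n arr (dom_wv mn mx n arr hdom) (pre_nonneg mn mx n arr hpre))
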